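-- pv_equiv track=rewrite | github.com/jbatte47/advent-of-code-solutions | day2.py | below_max
-- ===== SOURCE A (Python) =====
-- def below_max(counts):
--   max = {
--     'red': 12,
--     'green': 13,
--     'blue': 14,
--   }
--   violators = [color for color, count in counts.items() if color in max and count > max[color]]
--   return len(violators) == 0
-- ===== SOURCE B (Python) =====
-- def below_max(counts):
--   limits = {
--     'red': 12,
--     'green': 13,
--     'blue': 14,
--   }
--   for color, limit in limits.items():
--     if counts.get(color, 0) > limit:
--       return False
--   return True
-- ===== Notes on version B (the rewrite author's own statement) =====
-- stated objective: alternative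
-- what changed: B iterates over the three fixed limits and checks counts.get(color, 0) against each with an early return, instead of building a comprehension of violators by scanning every entry of the input dict; Pre_ only excludes association lists with duplicate keys, which do not represent a Python dict.
import Mathlib
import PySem

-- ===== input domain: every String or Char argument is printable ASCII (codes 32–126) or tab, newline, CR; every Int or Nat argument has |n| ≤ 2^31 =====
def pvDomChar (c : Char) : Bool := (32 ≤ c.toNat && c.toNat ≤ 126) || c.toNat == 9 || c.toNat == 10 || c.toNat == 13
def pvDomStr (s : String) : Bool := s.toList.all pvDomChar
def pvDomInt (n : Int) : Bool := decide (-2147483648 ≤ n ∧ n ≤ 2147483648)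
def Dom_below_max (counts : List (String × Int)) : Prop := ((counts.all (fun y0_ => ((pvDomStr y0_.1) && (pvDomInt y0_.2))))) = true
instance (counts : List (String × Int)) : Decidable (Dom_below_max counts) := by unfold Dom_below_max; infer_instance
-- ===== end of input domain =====

-- B checks the three fixed limits against counts.get(color, 0) with an early return,
-- instead of scanning the whole input dict for violators (objective: alternative decomposition).


-- ===== PORT A =====
def below_max (counts : List (String × Int)) : Bool :=
  let maxD : PySem.Dict String Int :=
    PySem.Dict.ofList [("red", 12), ("green", 13), ("blue", 14)]
  let violators : List String :=
    (counts.filter (fun p =>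
      maxD.contains p.1 && decide (maxD.getD p.1 0 < p.2))).map (fun p => p.1)
  decide (violators.length = 0)

-- ===== PORT B =====
-- the 'for color, limit in limits.items()' loop with early 'return False'
def bmLoop (counts : List (String × Int)) : List (String × Int) → Bool
  | [] => true
  | (color, limit) :: rest =>
    if (PySem.Dict.mk counts).getD color 0 > limit then false
    else bmLoop counts rest

def below_max_alt (counts : List (String × Int)) : Bool :=
  bmLoop counts [("red", 12), ("green", 13), ("blue", 14)]

-- ===== PRECONDITION & SPEC =====
-- Pre_ excludes association lists with duplicate keys: they do not represent a Python dict
-- (the argument's type), and which occurrence counts is an artefact of the list encoding.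
def Pre_below_max (counts : List (String × Int)) : Prop := (counts.map Prod.fst).Nodup
instance (counts : List (String × Int)) : Decidable (Pre_below_max counts) := by unfold Pre_below_max; infer_instance
def pvWitness_below_max : (List (String × Int)) := [("red", 3), ("blue", 20), ("ugly", 99)]

def Spec_below_max (counts : List (String × Int)) (out : Bool) : Prop := out = below_max_alt counts
instance (counts : List (String × Int)) (out : Bool) : Decidable (Spec_below_max counts out) := by unfold Spec_below_max; infer_instance

-- ===== CLAIM (what is proved, stated in full; the proofs are below) =====
def Claim_equal_below_max : Prop := ∀ (counts : List (String × Int)), Dom_below_max counts → Pre_below_max counts → Spec_below_max counts (below_max counts)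

-- ===== LEMMAS AND PROOFS =====

-- B unfolded: three independent lookups
lemma alt_eq (counts : List (String × Int)) :
    below_max_alt counts =
      (decide ((PySem.Dict.mk counts).getD "red" 0 ≤ 12) &&
       (decide ((PySem.Dict.mk counts).getD "green" 0 ≤ 13) &&
        decide ((PySem.Dict.mk counts).getD "blue" 0 ≤ 14))) := by
  simp only [below_max_alt, bmLoop]
  by_cases h1 : (PySem.Dict.mk counts).getD "red" 0 > 12 <;>
    by_cases h2 : (PySem.Dict.mk counts).getD "green" 0 > 13 <;>
      by_cases h3 : (PySem.Dict.mk counts).getD "blue" 0 > 14 <;>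
        simp [h1, h2, h3] <;> omega

lemma getD_not_mem (counts : List (String × Int)) (c : String)
    (h : c ∉ counts.map Prod.fst) : (PySem.Dict.mk counts).getD c 0 = 0 := by
  induction counts with
  | nil => simp [PySem.Dict.getD, PySem.Dict.get?]
  | cons p rest ih =>
    simp only [List.map_cons, List.mem_cons, not_or] at h
    have hne : ¬ (p.1 = c) := fun hh => h.1 hh.symm
    have : (PySem.Dict.mk (p :: rest)).get? c = (PySem.Dict.mk rest).get? c := by
      rw [PySem.Dict.get?_mk_cons]; simp [hne]
    have h2 := ih h.2
    simpa [PySem.Dict.getD, this] using h2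

-- A-side: peeling one entry off the comprehension
lemma A_cons (c : String) (v : Int) (rest : List (String × Int)) :
    below_max ((c, v) :: rest) =
      ((!((PySem.Dict.ofList [("red", (12:Int)), ("green", 13), ("blue", 14)]).contains c &&
          decide ((PySem.Dict.ofList [("red", (12:Int)), ("green", 13), ("blue", 14)]).getD c 0 < v))) &&
        below_max rest) := by
  simp only [below_max, List.filter_cons]
  by_cases h : ((PySem.Dict.ofList [("red", (12:Int)), ("green", 13), ("blue", 14)]).contains c &&
      decide ((PySem.Dict.ofList [("red", (12:Int)), ("green", 13), ("blue", 14)]).getD c 0 < v)) = true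
  · simp [h]
  · simp [h]

-- getD on the head entry / skipping a non-matching head
lemma getD_head (c : String) (v : Int) (rest : List (String × Int)) :
    (PySem.Dict.mk ((c, v) :: rest)).getD c 0 = v := by
  simp [PySem.Dict.getD, PySem.Dict.get?_mk_cons]

lemma getD_skip (c c' : String) (v : Int) (rest : List (String × Int)) (hne : c' ≠ c) :
    (PySem.Dict.mk ((c, v) :: rest)).getD c' 0 = (PySem.Dict.mk rest).getD c' 0 := by
  have h : ¬ (c = c') := fun hh => hne hh.symm
  simp [PySem.Dict.getD, PySem.Dict.get?_mk_cons, h]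

-- main equality, by induction on counts
lemma main_eq (counts : List (String × Int))
    (hnd : (counts.map Prod.fst).Nodup) : below_max counts = below_max_alt counts := by
  induction counts with
  | nil => decide
  | cons p rest ih =>
    obtain ⟨c, v⟩ := p
    simp only [List.map_cons, List.nodup_cons] at hnd
    have ihv := ih hnd.2
    rw [alt_eq] at ihv
    have hcr : (PySem.Dict.ofList [("red", (12:Int)), ("green", 13), ("blue", 14)]).contains "red" = true := by decide
    have hcg : (PySem.Dict.ofList [("red", (12:Int)), ("green", 13), ("blue", 14)]).contains "green" = true := by decide
    have hcb : (PySem.Dict.ofList [("red", (12:Int)), ("green", 13), ("blue", 14)]).contains "blue" = true := by decide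
    have hdr : (PySem.Dict.ofList [("red", (12:Int)), ("green", 13), ("blue", 14)]).getD "red" 0 = 12 := by decide
    have hdg : (PySem.Dict.ofList [("red", (12:Int)), ("green", 13), ("blue", 14)]).getD "green" 0 = 13 := by decide
    have hdb : (PySem.Dict.ofList [("red", (12:Int)), ("green", 13), ("blue", 14)]).getD "blue" 0 = 14 := by decide
    rw [A_cons, alt_eq, ihv]
    by_cases hr : c = "red"
    · subst hr
      rw [getD_head, getD_skip _ _ _ _ (by decide), getD_skip _ _ _ _ (by decide),
        getD_not_mem rest _ hnd.1]
      by_cases hv : (12:Int) < v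
      · simp [hcr, hdr, hv, show ¬ (v ≤ 12) by omega]
      · simp [hcr, hdr, hv, show v ≤ 12 by omega]
    · by_cases hg : c = "green"
      · subst hg
        rw [getD_head, getD_skip _ _ _ _ (by decide), getD_skip _ _ _ _ (by decide),
          getD_not_mem rest _ hnd.1]
        by_cases hv : (13:Int) < v
        · simp [hcg, hdg, hv, show ¬ (v ≤ 13) by omega]
        · simp [hcg, hdg, hv, show v ≤ 13 by omega]
      · by_cases hb : c = "blue"
        · subst hb
          rw [getD_head, getD_skip _ _ _ _ (by decide), getD_skip _ _ _ _ (by decide),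
            getD_not_mem rest _ hnd.1]
          by_cases hv : (14:Int) < v
          · simp [hcb, hdb, hv, show ¬ (v ≤ 14) by omega]
          · simp [hcb, hdb, hv, show v ≤ 14 by omega]
        · -- key outside the limit table: both sides ignore the entry
          rw [getD_skip _ _ _ _ (fun h => hr h.symm),
            getD_skip _ _ _ _ (fun h => hg h.symm),
            getD_skip _ _ _ _ (fun h => hb h.symm)]
          have hcont : (PySem.Dict.ofList [("red", (12:Int)), ("green", 13), ("blue", 14)]).contains c = false := by
            have h1 : ¬ ("red" = c) := fun h => hr h.symm
            have h2 : ¬ ("green" = c) := fun h => hg h.symm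
            have h3 : ¬ ("blue" = c) := fun h => hb h.symm
            have hofl : PySem.Dict.ofList [("red", (12:Int)), ("green", 13), ("blue", 14)]
                = PySem.Dict.mk [("red", 12), ("green", 13), ("blue", 14)] := by decide
            simp [hofl, PySem.Dict.contains, PySem.Dict.get?_mk_cons,
              PySem.Dict.get?, h1, h2, h3]
          simp [hcont]

-- ===== VERDICT (by name: the statement is the Claim_ definition above) =====
theorem below_max_spec : Claim_equal_below_max := by
  intro counts _ hpre
  show below_max counts = below_max_alt counts
  exact main_eq counts hpre
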